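-- pv_equiv track=rewrite | github.com/SD2E/sbol-dictionary-maintainer | SD2DictionaryWriter/SD2DictionaryWriter.py | rowsEqual
-- ===== SOURCE A (Python) =====
-- def rowsEqual(row1, row2, keys):
--     for key in keys:
--         if key not in row1:
--             if key in row2:
--                 return False
--         elif key not in row2:
--             if key in row1:
--                 return False
--
--         elif row1[key] != row2[key]:
--             return False
--
--     return True
-- ===== SOURCE B (Python) =====
-- def rowsEqual(row1, row2, keys):
--     def proj(row):
--         return [(k, row[k]) for k in keys if k in row]
--     return proj(row1) == proj(row2)
-- ===== Notes on version B (the rewrite author's own statement) =====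
-- stated objective: simpler
-- what changed: Replaces the per-key presence/value branch cascade with projecting each row to its ordered list of (key, value) pairs restricted to keys and comparing the two projections structurally.
import Mathlib
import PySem

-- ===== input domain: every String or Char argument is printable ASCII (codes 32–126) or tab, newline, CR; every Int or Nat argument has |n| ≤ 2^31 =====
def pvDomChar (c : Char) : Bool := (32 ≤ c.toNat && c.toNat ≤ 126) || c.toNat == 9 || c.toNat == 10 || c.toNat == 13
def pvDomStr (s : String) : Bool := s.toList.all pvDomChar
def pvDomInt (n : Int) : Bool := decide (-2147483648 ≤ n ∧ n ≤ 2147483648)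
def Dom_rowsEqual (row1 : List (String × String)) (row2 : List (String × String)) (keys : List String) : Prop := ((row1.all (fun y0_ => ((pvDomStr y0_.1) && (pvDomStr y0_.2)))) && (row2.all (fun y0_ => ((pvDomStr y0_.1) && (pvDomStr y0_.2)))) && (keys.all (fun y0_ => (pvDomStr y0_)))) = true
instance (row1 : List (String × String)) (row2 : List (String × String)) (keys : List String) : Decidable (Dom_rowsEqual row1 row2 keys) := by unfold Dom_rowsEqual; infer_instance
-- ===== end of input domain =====

-- B replaces A's per-key branch cascade with two ordered (key, value) projections compared structurally; objective: simpler.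

-- ===== PORT A =====
-- literal transliteration of A's for-loop with early returns, as structural recursion over keys
def rowsEqualGo (row1 : List (String × String)) (row2 : List (String × String)) (ks : List String) : Bool :=
  match ks with
  | [] => true
  | k :: rest =>
    if ¬ (PySem.Dict.mk row1).contains k then
      if (PySem.Dict.mk row2).contains k then false
      else rowsEqualGo row1 row2 rest
    else if ¬ (PySem.Dict.mk row2).contains k then
      if (PySem.Dict.mk row1).contains k then false
      else rowsEqualGo row1 row2 rest
    -- here both keys are present, so row1[key] != row2[key] is comparison of the get? values
    else if (PySem.Dict.mk row1).get? k ≠ (PySem.Dict.mk row2).get? k then false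
    else rowsEqualGo row1 row2 rest

def rowsEqual (row1 : List (String × String)) (row2 : List (String × String)) (keys : List String) : Bool :=
  rowsEqualGo row1 row2 keys

-- ===== PORT B =====
-- [(k, row[k]) for k in keys if k in row]
def rowsEqualProj (row : List (String × String)) (keys : List String) : List (String × String) :=
  keys.filterMap (fun k => ((PySem.Dict.mk row).get? k).map (fun v => (k, v)))

def rowsEqual_alt (row1 : List (String × String)) (row2 : List (String × String)) (keys : List String) : Bool :=
  rowsEqualProj row1 keys == rowsEqualProj row2 keys

-- ===== PRECONDITION & SPEC =====
def Spec_rowsEqual (row1 : List (String × String)) (row2 : List (String × String)) (keys : List String) (out : Bool) : Prop := out = rowsEqual_alt row1 row2 keys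
instance (row1 : List (String × String)) (row2 : List (String × String)) (keys : List String) (out : Bool) : Decidable (Spec_rowsEqual row1 row2 keys out) := by unfold Spec_rowsEqual; infer_instance

-- ===== CLAIM (what is proved, stated in full; the proofs are below) =====
def Claim_equal_rowsEqual : Prop := ∀ (row1 : List (String × String)) (row2 : List (String × String)) (keys : List String), Dom_rowsEqual row1 row2 keys → Spec_rowsEqual row1 row2 keys (rowsEqual row1 row2 keys)

-- ===== LEMMAS AND PROOFS =====

theorem mem_rowsEqualProj {row : List (String × String)} {ks : List String} {a b : String}
    (h : (a, b) ∈ rowsEqualProj row ks) : (PySem.Dict.mk row).get? a = some b := by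
  simp only [rowsEqualProj, List.mem_filterMap, Option.map_eq_some_iff] at h
  obtain ⟨k, _, v, hv, hkv⟩ := h
  cases hkv; exact hv

theorem rowsEqualGo_eq (row1 row2 : List (String × String)) (ks : List String) :
    rowsEqualGo row1 row2 ks = (rowsEqualProj row1 ks == rowsEqualProj row2 ks) := by
  induction ks with
  | nil => rfl
  | cons k rest ih =>
    have hc1 : (PySem.Dict.mk row1).contains k = ((PySem.Dict.mk row1).get? k).isSome :=
      PySem.Dict.contains_eq_isSome_get? ..
    have hc2 : (PySem.Dict.mk row2).contains k = ((PySem.Dict.mk row2).get? k).isSome :=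
      PySem.Dict.contains_eq_isSome_get? ..
    rw [rowsEqualGo]
    cases h1 : (PySem.Dict.mk row1).get? k with
    | none =>
      cases h2 : (PySem.Dict.mk row2).get? k with
      | none =>
        simp [rowsEqualProj, hc1, hc2, h1, h2, ih, rowsEqualProj]
      | some v2 =>
        simp only [hc1, hc2, h1, h2]
        have hne : ¬ (rowsEqualProj row1 rest == (k, v2) :: rowsEqualProj row2 rest) = true := by
          intro hbeq
          have heq := eq_of_beq hbeq
          have hmem : (k, v2) ∈ rowsEqualProj row1 rest := heq ▸ List.mem_cons_self ..
          have hget := mem_rowsEqualProj hmem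
          rw [h1] at hget
          simp at hget
        simp only [rowsEqualProj, List.filterMap_cons, h1, h2, Option.map_some,
          Option.map_none] at hne ⊢
        simp [hne]
    | some v1 =>
      cases h2 : (PySem.Dict.mk row2).get? k with
      | none =>
        simp only [hc1, hc2, h1, h2]
        have : ¬ ((k, v1) :: rowsEqualProj row1 rest == rowsEqualProj row2 rest) = true := by
          intro hbeq
          have heq := eq_of_beq hbeq
          have hmem : (k, v1) ∈ rowsEqualProj row2 rest := heq ▸ List.mem_cons_self ..
          have := mem_rowsEqualProj hmem
          simp [h2] at this
        simp only [rowsEqualProj, List.filterMap_cons, h1, h2, Option.map_some] at this ⊢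
        simp [this]
      | some v2 =>
        simp only [hc1, hc2, h1, h2]
        by_cases hv : v1 = v2
        · subst hv
          simp only [rowsEqualProj, List.filterMap_cons, h1, h2, Option.map_some]
          simpa [rowsEqualProj] using ih
        · simp only [rowsEqualProj, List.filterMap_cons, h1, h2, Option.map_some]
          simp [hv]

-- ===== VERDICT (by name: the statement is the Claim_ definition above) =====
theorem rowsEqual_spec : Claim_equal_rowsEqual := by
  intro row1 row2 keys _
  unfold Spec_rowsEqual rowsEqual rowsEqual_alt
  exact rowsEqualGo_eq row1 row2 keys
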